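-- pv_equiv track=rewrite | github.com/dzungphieuluuky/TensorTonic-Solutions | top-k-recommendations/top-k-recommendations.py | top_k_recommendations
-- ===== SOURCE A (Python) =====
-- def top_k_recommendations(scores, rated_indices, k):
--     """
--     Return indices of top-k unrated items by predicted score.
--     """
--     score_idx = []
--     for i in range(len(scores)):
--         score_idx.append((scores[i], i))
--     score_idx.sort(key=lambda x: x[0], reverse=True)
--     res = []
--     ok = 0
--     for (score, idx) in score_idx:
--         if idx in rated_indices:
--             continue
--         if ok == k:
--             break
--         res.append(idx)
--         ok += 1
--     return res
-- ===== SOURCE B (Python) =====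
-- def top_k_recommendations(scores, rated_indices, k):
--     """
--     Return indices of top-k unrated items by predicted score,
--     by repeated selection of the best remaining candidate.
--     """
--     res = []
--     rated = set(rated_indices)
--     chosen = set()
--     count = 0
--     while count != k:
--         best = None
--         for i in range(len(scores)):
--             if i in rated or i in chosen:
--                 continue
--             if best is None or scores[i] > scores[best]:
--                 best = i
--         if best is None:
--             break
--         res.append(best)
--         chosen.add(best)
--         count += 1
--     return res
-- ===== Notes on version B (the rewrite author's own statement) =====
-- stated objective: alternative
-- what changed: Replaces sort-then-scan (build (score,i) pairs, stable reverse sort, walk skipping rated until k taken) by repeated selection: a while count != k loop that each pass scans all indices for the unrated (precomputed set), not-yet-chosen index of maximum score (earliest on ties) and appends it, stopping when no candidate remains.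
import Mathlib
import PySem

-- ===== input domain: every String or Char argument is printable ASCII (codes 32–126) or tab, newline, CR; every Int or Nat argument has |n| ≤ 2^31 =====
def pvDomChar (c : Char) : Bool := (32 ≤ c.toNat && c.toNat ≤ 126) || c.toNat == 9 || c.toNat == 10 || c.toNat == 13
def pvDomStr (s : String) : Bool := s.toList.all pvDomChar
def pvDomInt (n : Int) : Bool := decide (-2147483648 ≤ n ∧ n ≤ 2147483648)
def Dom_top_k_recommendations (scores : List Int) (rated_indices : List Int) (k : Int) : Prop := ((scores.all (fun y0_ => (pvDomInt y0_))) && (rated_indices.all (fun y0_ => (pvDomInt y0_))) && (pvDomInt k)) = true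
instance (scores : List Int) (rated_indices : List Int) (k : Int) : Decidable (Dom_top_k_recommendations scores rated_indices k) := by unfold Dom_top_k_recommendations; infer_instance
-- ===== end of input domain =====

-- B replaces A's sort-then-scan by repeated selection of the best remaining candidate
-- (objective: alternative algorithm of similar cost; return values proved equal).

-- ===== PORT A =====
-- the 'for (score, idx) in score_idx' loop with its break/continue, over remaining list t, state (res, ok)
def topkLoopA (rated : List Int) (k : Int) : List (Int × Int) → List Int → Int → List Int
  | [], res, _ => res
  | (_, idx) :: t, res, ok =>
    if idx ∈ rated then topkLoopA rated k t res ok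
    else if ok = k then res
    else topkLoopA rated k t (res ++ [idx]) (ok + 1)

def top_k_recommendations (scores : List Int) (rated_indices : List Int) (k : Int) : List Int :=
  -- score_idx = [(scores[i], i) for i in range(len(scores))]; i is always in range so getD 0 is never hit
  let score_idx := (PySem.List.pyRange 0 (scores.length : Int)).foldl
      (fun acc i => acc ++ [((PySem.List.pyGet? scores i).getD 0, i)]) []
  topkLoopA rated_indices k (PySem.List.sorted score_idx Prod.fst true) [] 0

-- ===== PORT B =====
-- body of B's inner 'for i in range(len(scores))' scan: keep the best eligible index seen so far
-- (rated is B's precomputed set(rated_indices))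
def topkStep (scores rated : List Int) (chosen : PySem.Set Int) (best : Option Int) (i : Int) : Option Int :=
  if i ∈ rated ∨ i ∈ chosen then best
  else
    match best with
    | none => some i
    | some b =>
        if (PySem.List.pyGet? scores b).getD 0 < (PySem.List.pyGet? scores i).getD 0 then some i else best

def topkScan (scores rated : List Int) (chosen : PySem.Set Int) : Option Int :=
  (PySem.List.pyRange 0 (scores.length : Int)).foldl (topkStep scores rated chosen) none

-- the 'while count != k' loop; fuel bounds the (finite) number of iterations
def topkLoopB (scores rated : List Int) (k : Int) : Nat → PySem.Set Int → List Int → Int → List Int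
  | 0, _, res, _ => res
  | fuel + 1, chosen, res, count =>
    if count = k then res
    else
      match topkScan scores rated chosen with
      | none => res
      | some b => topkLoopB scores rated k fuel (PySem.Set.add chosen b) (res ++ [b]) (count + 1)

def top_k_recommendations_alt (scores : List Int) (rated_indices : List Int) (k : Int) : List Int :=
  topkLoopB scores (PySem.Set.ofList rated_indices) k (scores.length + 1) PySem.Set.empty [] 0

-- ===== PRECONDITION & SPEC =====
def Spec_top_k_recommendations (scores : List Int) (rated_indices : List Int) (k : Int) (out : List Int) : Prop := out = top_k_recommendations_alt scores rated_indices k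
instance (scores : List Int) (rated_indices : List Int) (k : Int) (out : List Int) : Decidable (Spec_top_k_recommendations scores rated_indices k out) := by unfold Spec_top_k_recommendations; infer_instance

-- ===== CLAIM (what is proved, stated in full; the proofs are below) =====
def Claim_equal_top_k_recommendations : Prop := ∀ (scores : List Int) (rated_indices : List Int) (k : Int), Dom_top_k_recommendations scores rated_indices k → Spec_top_k_recommendations scores rated_indices k (top_k_recommendations scores rated_indices k)

-- ===== LEMMAS AND PROOFS =====

def scAt (scores : List Int) (i : Int) : Int := (PySem.List.pyGet? scores i).getD 0
def pairsOf (scores : List Int) : List (Int × Int) :=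
  (PySem.List.pyRange 0 (scores.length : Int)).foldl
      (fun acc i => acc ++ [((PySem.List.pyGet? scores i).getD 0, i)]) []

lemma pairsOf_eq (scores : List Int) :
    pairsOf scores = (List.range scores.length).map (fun (j : Nat) => (scAt scores (j : Int), (j : Int))) := by
  unfold pairsOf
  rw [PySem.List.foldl_append_singleton_eq_map (f := fun i => ((PySem.List.pyGet? scores i).getD 0, i))]
  rw [PySem.List.pyRange_zero_natCast, List.map_map]
  rfl

lemma pairsOf_pairwise (scores : List Int) : (pairsOf scores).Pairwise (fun p q => p.2 < q.2) := by
  rw [pairsOf_eq, List.pairwise_map]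
  refine (List.pairwise_lt_range).imp ?_
  intro a b h
  show (a : Int) < (b : Int)
  exact_mod_cast h

def Rlex (p q : Int × Int) : Prop := q.1 < p.1 ∨ (p.1 = q.1 ∧ p.2 < q.2)

lemma insertBy_stable_pairwise (x : Int × Int) (acc : List (Int × Int))
    (hacc : acc.Pairwise Rlex) (hx : ∀ a ∈ acc, a.2 < x.2) :
    (PySem.List.insertBy (fun a b => decide (b.1 < a.1)) x acc).Pairwise Rlex := by
  induction acc with
  | nil => simp [PySem.List.insertBy]
  | cons y ys ih =>
    rw [PySem.List.insertBy]
    rcases List.pairwise_cons.1 hacc with ⟨hyys, hys⟩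
    by_cases hb : y.1 < x.1
    · simp only [hb, decide_true, if_true]
      refine List.pairwise_cons.2 ⟨?_, hacc⟩
      intro z hz
      rcases List.mem_cons.1 hz with hz | hz
      · subst hz; exact Or.inl hb
      · rcases hyys z hz with h1 | ⟨h2, _⟩
        · exact Or.inl (lt_trans h1 hb)
        · exact Or.inl (h2 ▸ hb)
    · simp only [hb, decide_false]
      refine List.pairwise_cons.2 ⟨?_, ih hys (fun a ha => hx a (List.mem_cons_of_mem _ ha))⟩
      intro z hz
      rcases (PySem.List.mem_insertBy _ _ _ _).1 hz with hz | hz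
      · subst hz
        rcases lt_or_eq_of_le (le_of_not_gt hb) with h | h
        · exact Or.inl h
        · exact Or.inr ⟨h.symm, hx y (List.mem_cons_self)⟩
      · exact hyys z hz

lemma foldl_insertBy_pairwise (xs : List (Int × Int)) :
    ∀ (acc : List (Int × Int)),
    acc.Pairwise Rlex →
    (∀ a ∈ acc, ∀ b ∈ xs, a.2 < b.2) →
    xs.Pairwise (fun a b => a.2 < b.2) →
    (xs.foldl (fun acc x => PySem.List.insertBy (fun a b => decide (b.1 < a.1)) x acc) acc).Pairwise Rlex := by
  induction xs with
  | nil => intro acc hacc _ _; simpa using hacc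
  | cons x t ih =>
    intro acc hacc hcross hxs
    rcases List.pairwise_cons.1 hxs with ⟨hxt, ht⟩
    simp only [List.foldl_cons]
    refine ih _ (insertBy_stable_pairwise x acc hacc (fun a ha => hcross a ha x List.mem_cons_self)) ?_ ht
    intro a ha b hb
    rcases (PySem.List.mem_insertBy _ _ _ _).1 ha with h | h
    · subst h; exact hxt b hb
    · exact hcross a h b (List.mem_cons_of_mem _ hb)

lemma sortedL_pairwise (scores : List Int) :
    (PySem.List.sorted (pairsOf scores) Prod.fst true).Pairwise Rlex := by
  rw [PySem.List.sorted_rev_eq_foldl_insertBy]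
  exact foldl_insertBy_pairwise _ _ List.Pairwise.nil (by simp) (pairsOf_pairwise scores)

def takeK (k count : Int) (xs : List Int) : List Int := if k < 0 then xs else xs.take (k - count).toNat

lemma loopA_eq (rated : List Int) (k : Int) :
    ∀ (t : List (Int × Int)) (res : List Int) (ok : Int),
    0 ≤ ok → (ok ≤ k ∨ k < 0) →
    topkLoopA rated k t res ok
      = res ++ takeK k ok ((t.filter (fun p => ¬ p.2 ∈ rated)).map Prod.snd) := by
  intro t
  induction t with
  | nil => intro res ok h1 h2; simp [topkLoopA, takeK]
  | cons p t ih =>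
    intro res ok h1 h2
    obtain ⟨s, idx⟩ := p
    rw [topkLoopA]
    by_cases hr : idx ∈ rated
    · rw [if_pos hr, ih res ok h1 h2]
      simp [hr]
    · rw [if_neg hr]
      by_cases hk : ok = k
      · rw [if_pos hk]
        have hk0 : ¬ k < 0 := by omega
        simp [takeK, hk0, hk, hr]
      · rw [if_neg hk, ih (res ++ [idx]) (ok + 1) (by omega) (by omega)]
        have : (List.filter (fun p => decide (¬ p.2 ∈ rated)) ((s, idx) :: t)).map Prod.snd
            = idx :: (List.filter (fun p => decide (¬ p.2 ∈ rated)) t).map Prod.snd := by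
          simp [hr]
        rw [this]
        by_cases hneg : k < 0
        · simp [takeK, hneg]
        · have h3 : (k - ok).toNat = (k - (ok + 1)).toNat + 1 := by omega
          simp [takeK, hneg, h3]

def Elig (rated : List Int) (chosen : PySem.Set Int) (i : Int) : Prop := ¬ i ∈ rated ∧ ¬ i ∈ chosen

lemma scan_some_of_some (scores rated : List Int) (chosen : PySem.Set Int) :
    ∀ (idxs : List Int) (x : Int),
    ∃ b, idxs.foldl (topkStep scores rated chosen) (some x) = some b := by
  have hstep : ∀ (x i : Int), ∃ y, topkStep scores rated chosen (some x) i = some y := by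
    intro x i
    unfold topkStep
    by_cases h1 : i ∈ rated ∨ i ∈ chosen
    · exact ⟨x, by simp [h1]⟩
    · simp only [if_neg h1]
      by_cases h2 : (PySem.List.pyGet? scores x).getD 0 < (PySem.List.pyGet? scores i).getD 0
      · exact ⟨i, by simp [h2]⟩
      · exact ⟨x, by simp [h2]⟩
  intro idxs
  induction idxs with
  | nil => intro x; exact ⟨x, rfl⟩
  | cons i t ih =>
    intro x
    simp only [List.foldl_cons]
    obtain ⟨y, hy⟩ := hstep x i
    rw [hy]
    exact ih y

lemma scan_none_of (scores rated : List Int) (chosen : PySem.Set Int) :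
    ∀ (idxs : List Int), (∀ j ∈ idxs, ¬ Elig rated chosen j) →
    idxs.foldl (topkStep scores rated chosen) none = none := by
  intro idxs
  induction idxs with
  | nil => intro _; rfl
  | cons i t ih =>
    intro h
    have hi := h i List.mem_cons_self
    have : i ∈ rated ∨ i ∈ chosen := by
      by_contra hc
      push Not at hc
      exact hi ⟨hc.1, hc.2⟩
    simp only [List.foldl_cons, topkStep, if_pos this]
    exact ih (fun j hj => h j (List.mem_cons_of_mem _ hj))

lemma scan_isSome (scores rated : List Int) (chosen : PySem.Set Int) :
    ∀ (idxs : List Int), (∃ j ∈ idxs, Elig rated chosen j) →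
    ∃ b, idxs.foldl (topkStep scores rated chosen) none = some b := by
  intro idxs
  induction idxs with
  | nil => rintro ⟨j, hj, _⟩; exact absurd hj (List.not_mem_nil)
  | cons i t ih =>
    rintro ⟨j, hj, hel⟩
    simp only [List.foldl_cons]
    by_cases hi : i ∈ rated ∨ i ∈ chosen
    · rw [show topkStep scores rated chosen none i = none by simp [topkStep, hi]]
      refine ih ⟨j, ?_, hel⟩
      rcases List.mem_cons.1 hj with rfl | hjt
      · exact absurd hi (by push Not; exact ⟨hel.1, hel.2⟩)
      · exact hjt
    · rw [show topkStep scores rated chosen none i = some i by simp [topkStep, hi]]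
      exact scan_some_of_some scores rated chosen t i

lemma scan_go (scores rated : List Int) (chosen : PySem.Set Int) :
    ∀ (idxs : List Int) (a : Option Int) (b : Int),
    idxs.Pairwise (· < ·) →
    (∀ x, a = some x → Elig rated chosen x ∧ ∀ j ∈ idxs, x < j) →
    idxs.foldl (topkStep scores rated chosen) a = some b →
    Elig rated chosen b ∧ (a = some b ∨ b ∈ idxs) ∧
      (∀ x, a = some x → b ≠ x → scAt scores x < scAt scores b) ∧
      (∀ j ∈ idxs, Elig rated chosen j →
        scAt scores j < scAt scores b ∨ (scAt scores j = scAt scores b ∧ b ≤ j)) := by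
  intro idxs
  induction idxs with
  | nil =>
    intro a b _ ha hf
    simp only [List.foldl_nil] at hf
    subst hf
    exact ⟨(ha b rfl).1, Or.inl rfl, fun x hx hne => absurd (Option.some_injective _ hx) hne,
      by simp⟩
  | cons i t ih =>
    intro a b hpw ha hf
    rcases List.pairwise_cons.1 hpw with ⟨hit, ht⟩
    simp only [List.foldl_cons] at hf
    by_cases hi : i ∈ rated ∨ i ∈ chosen
    · have hstep : topkStep scores rated chosen a i = a := by
        simp [topkStep, hi]
      rw [hstep] at hf
      obtain ⟨c1, c2, c3, c4⟩ := ih a b ht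
        (fun x hx => ⟨(ha x hx).1, fun j hj => (ha x hx).2 j (List.mem_cons_of_mem _ hj)⟩) hf
      refine ⟨c1, ?_, c3, ?_⟩
      · rcases c2 with h | h
        · exact Or.inl h
        · exact Or.inr (List.mem_cons_of_mem _ h)
      · intro j hj hel
        rcases List.mem_cons.1 hj with rfl | hjt
        · exact absurd hi (by push Not; exact ⟨hel.1, hel.2⟩)
        · exact c4 j hjt hel
    · have heligi : Elig rated chosen i := by
        constructor <;> (intro h; exact hi (by tauto))
      -- the j = i part, shared by the two sub-cases where the accumulator becomes `some i`
      rcases ha' : a with _ | x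
      · subst ha'
        have hstep : topkStep scores rated chosen none i = some i := by simp [topkStep, hi]
        rw [hstep] at hf
        obtain ⟨c1, c2, c3, c4⟩ := ih (some i) b ht
          (fun x hx => by
            rcases Option.some_injective _ hx with rfl
            exact ⟨heligi, hit⟩) hf
        refine ⟨c1, ?_, by simp, ?_⟩
        · rcases c2 with h | h
          · exact Or.inr (by simp [Option.some_injective _ h])
          · exact Or.inr (List.mem_cons_of_mem _ h)
        · intro j hj hel
          rcases List.mem_cons.1 hj with rfl | hjt
          · by_cases hbj : b = j
            · exact Or.inr ⟨by rw [hbj], le_of_eq hbj⟩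
            · exact Or.inl (c3 j rfl hbj)
          · exact c4 j hjt hel
      · subst ha'
        obtain ⟨heligx, hxlt⟩ := ha x rfl
        by_cases hlt : (PySem.List.pyGet? scores x).getD 0 < (PySem.List.pyGet? scores i).getD 0
        · have hstep : topkStep scores rated chosen (some x) i = some i := by
            simp [topkStep, hi, hlt]
          rw [hstep] at hf
          obtain ⟨c1, c2, c3, c4⟩ := ih (some i) b ht
            (fun y hy => by
              rcases Option.some_injective _ hy with rfl
              exact ⟨heligi, hit⟩) hf
          have hxb : scAt scores x < scAt scores b := by
            by_cases hbi : b = i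
            · subst hbi; exact hlt
            · exact lt_trans hlt (c3 i rfl hbi)
          refine ⟨c1, ?_, fun y hy hne => by rcases Option.some_injective _ hy with rfl; exact hxb, ?_⟩
          · rcases c2 with h | h
            · exact Or.inr (by simp [Option.some_injective _ h])
            · exact Or.inr (List.mem_cons_of_mem _ h)
          · intro j hj hel
            rcases List.mem_cons.1 hj with rfl | hjt
            · by_cases hbj : b = j
              · exact Or.inr ⟨by rw [hbj], le_of_eq hbj⟩
              · exact Or.inl (c3 j rfl hbj)
            · exact c4 j hjt hel
        · have hstep : topkStep scores rated chosen (some x) i = some x := by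
            simp [topkStep, hi, hlt]
          rw [hstep] at hf
          obtain ⟨c1, c2, c3, c4⟩ := ih (some x) b ht
            (fun y hy => by
              rcases Option.some_injective _ hy with rfl
              exact ⟨heligx, fun j hj => hxlt j (List.mem_cons_of_mem _ hj)⟩) hf
          have hile : scAt scores i ≤ scAt scores x := not_lt.1 hlt
          refine ⟨c1, ?_, c3, ?_⟩
          · rcases c2 with h | h
            · exact Or.inl h
            · exact Or.inr (List.mem_cons_of_mem _ h)
          · intro j hj hel
            rcases List.mem_cons.1 hj with rfl | hjt
            · by_cases hbx : b = x
              · subst hbx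
                rcases lt_or_eq_of_le hile with h | h
                · exact Or.inl h
                · exact Or.inr ⟨h, le_of_lt (hxlt j List.mem_cons_self)⟩
              · exact Or.inl (lt_of_le_of_lt hile (c3 x rfl hbx))
            · exact c4 j hjt hel

lemma pyRange_pairwise_lt (n : Nat) : (PySem.List.pyRange 0 (n : Int)).Pairwise (· < ·) := by
  rw [PySem.List.pyRange_zero_natCast, List.pairwise_map]
  refine (List.pairwise_lt_range).imp ?_
  intro a b h
  show (a : Int) < (b : Int)
  exact_mod_cast h

lemma takeK_nil (k count : Int) : takeK k count [] = [] := by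
  simp [takeK]

lemma loopB_eq (scores rated : List Int) (k : Int) :
    ∀ (r : List (Int × Int)) (fuel : Nat) (chosen : PySem.Set Int) (res : List Int) (count : Int),
    r.length < fuel →
    r.Pairwise Rlex →
    (∀ p ∈ r, 0 ≤ p.2 ∧ p.2 < (scores.length : Int) ∧ p.1 = scAt scores p.2) →
    (r.map Prod.snd).Nodup →
    (∀ j : Int, (Elig rated chosen j ∧ 0 ≤ j ∧ j < (scores.length : Int)) ↔ j ∈ r.map Prod.snd) →
    0 ≤ count → (count ≤ k ∨ k < 0) →
    topkLoopB scores rated k fuel chosen res count = res ++ takeK k count (r.map Prod.snd) := by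
  intro r
  induction r with
  | nil =>
    intro fuel chosen res count hfuel _ _ _ hiff hc hck
    obtain ⟨f, rfl⟩ : ∃ f, fuel = f + 1 := ⟨fuel - 1, by omega⟩
    rw [topkLoopB]
    by_cases hk : count = k
    · simp [hk, takeK_nil]
    · rw [if_neg hk]
      have hscan : topkScan scores rated chosen = none := by
        refine scan_none_of scores rated chosen _ ?_
        intro j hj hel
        have hb := (PySem.List.mem_pyRange_one).1 hj
        exact absurd ((hiff j).1 ⟨hel, hb.1, hb.2⟩) (List.not_mem_nil)
      rw [hscan]
      simp [takeK_nil]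
  | cons p t ih =>
    intro fuel chosen res count hfuel hpw hgen hnd hiff hc hck
    obtain ⟨f, rfl⟩ : ∃ f, fuel = f + 1 := ⟨fuel - 1, by omega⟩
    rw [topkLoopB]
    by_cases hk : count = k
    · rw [if_pos hk]
      have hneg : ¬ k < 0 := by omega
      have hz : takeK k count (List.map Prod.snd (p :: t)) = [] := by
        rw [takeK, if_neg hneg, hk]
        simp
      rw [hz, List.append_nil]
    · rw [if_neg hk]
      -- the head of r is eligible and in range
      have hhead : p.2 ∈ (p :: t).map Prod.snd := by simp
      obtain ⟨helig0, hb0⟩ : Elig rated chosen p.2 ∧ 0 ≤ p.2 ∧ p.2 < (scores.length : Int) :=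
        ⟨((hiff p.2).2 hhead).1, ((hiff p.2).2 hhead).2⟩
      have hmem0 : p.2 ∈ PySem.List.pyRange 0 (scores.length : Int) :=
        (PySem.List.mem_pyRange_one).2 ⟨hb0.1, hb0.2⟩
      obtain ⟨b, hscan⟩ := scan_isSome scores rated chosen _ ⟨p.2, hmem0, helig0⟩
      obtain ⟨celig, cmem, _, cmax⟩ := scan_go scores rated chosen _ none b
        (pyRange_pairwise_lt scores.length) (by intro x hx; cases hx) hscan
      have cmem' : b ∈ PySem.List.pyRange 0 (scores.length : Int) := by
        rcases cmem with h | h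
        · cases h
        · exact h
      have hbbound := (PySem.List.mem_pyRange_one).1 cmem'
      -- b is the head index p.2
      have hb : b = p.2 := by
        have hbr : b ∈ (p :: t).map Prod.snd := (hiff b).1 ⟨celig, hbbound.1, hbbound.2⟩
        have hspec0 := cmax p.2 hmem0 helig0
        rcases List.mem_cons.1 hbr with h | h
        · exact h
        · obtain ⟨q, hq, hq2⟩ := List.mem_map.1 h
          have hrl : Rlex p q := (List.pairwise_cons.1 hpw).1 q hq
          have hgq := hgen q (List.mem_cons_of_mem _ hq)
          have hgp := hgen p List.mem_cons_self
          rw [Rlex] at hrl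
          rw [hgq.2.2] at hrl
          rw [hq2] at hrl
          rw [hgp.2.2] at hrl
          rcases hrl with h1 | ⟨h1, h2⟩ <;> rcases hspec0 with h3 | ⟨h3, h4⟩ <;> omega
      have hscan2 : topkScan scores rated chosen = some b := hscan
      rw [hscan2, hb]
      show topkLoopB scores rated k f (PySem.Set.add chosen p.2) (res ++ [p.2]) (count + 1)
          = res ++ takeK k count (List.map Prod.snd (p :: t))
      -- apply the induction hypothesis to the tail
      rw [List.map_cons] at hnd
      have hnd' := List.nodup_cons.1 hnd
      rw [ih f (PySem.Set.add chosen p.2) (res ++ [p.2]) (count + 1)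
        (by simpa using hfuel) hpw.of_cons (fun q hq => hgen q (List.mem_cons_of_mem _ hq))
        hnd'.2 ?_ (by omega) (by omega)]
      · -- list algebra: res ++ [p.2] ++ takeK k (count+1) = res ++ takeK k count (p.2 :: …)
        have hmap : (p :: t).map Prod.snd = p.2 :: t.map Prod.snd := by simp
        rw [hmap]
        by_cases hneg : k < 0
        · simp [takeK, hneg]
        · have h3 : (k - count).toNat = (k - (count + 1)).toNat + 1 := by omega
          simp [takeK, hneg, h3]
      · -- the eligibility characterisation for the tail
        intro j
        constructor
        · rintro ⟨⟨hjr, hjc⟩, hjb⟩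
          rw [PySem.Set.mem_add] at hjc
          push Not at hjc
          have : j ∈ (p :: t).map Prod.snd := (hiff j).1 ⟨⟨hjr, hjc.1⟩, hjb⟩
          rcases List.mem_cons.1 this with h | h
          · exact absurd h hjc.2
          · exact h
        · intro hj
          have hj' : j ∈ (p :: t).map Prod.snd := by simp [hj]
          obtain ⟨⟨hjr, hjc⟩, hjb⟩ := (hiff j).2 hj'
          have hne : j ≠ p.2 := by
            intro h
            rw [h] at hj
            exact hnd'.1 hj
          exact ⟨⟨hjr, by rw [PySem.Set.mem_add]; push Not; exact ⟨hjc, hne⟩⟩, hjb⟩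

-- ===== VERDICT (by name: the statement is the Claim_ definition above) =====
theorem top_k_recommendations_spec : Claim_equal_top_k_recommendations := by
  intro scores rated k _
  unfold Spec_top_k_recommendations
  have hA : top_k_recommendations scores rated k
      = topkLoopA rated k (PySem.List.sorted (pairsOf scores) Prod.fst true) [] 0 := rfl
  have hB : top_k_recommendations_alt scores rated k
      = topkLoopB scores (PySem.Set.ofList rated) k (scores.length + 1) PySem.Set.empty [] 0 := rfl
  set L := PySem.List.sorted (pairsOf scores) Prod.fst true with hLdef
  have hperm : L.Perm (pairsOf scores) := PySem.List.sorted_perm _ _ _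
  have hgenP : ∀ p ∈ pairsOf scores, 0 ≤ p.2 ∧ p.2 < (scores.length : Int) ∧ p.1 = scAt scores p.2 := by
    intro p hp
    rw [pairsOf_eq] at hp
    obtain ⟨j, hj, rfl⟩ := List.mem_map.1 hp
    rw [List.mem_range] at hj
    exact ⟨Int.natCast_nonneg j, by show ((j:Int)) < _; exact_mod_cast hj, rfl⟩
  have hmemP : ∀ j : Int, j ∈ (pairsOf scores).map Prod.snd ↔ (0 ≤ j ∧ j < (scores.length : Int)) := by
    intro j
    rw [pairsOf_eq, List.map_map]
    constructor
    · intro h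
      obtain ⟨m, hm, rfl⟩ := List.mem_map.1 h
      rw [List.mem_range] at hm
      exact ⟨Int.natCast_nonneg m, by show ((m:Int)) < _; exact_mod_cast hm⟩
    · rintro ⟨h1, h2⟩
      refine List.mem_map.2 ⟨j.toNat, ?_, ?_⟩
      · rw [List.mem_range]; omega
      · simp; omega
  have hndP : ((pairsOf scores).map Prod.snd).Nodup := by
    rw [pairsOf_eq, List.map_map]
    refine List.Nodup.map ?_ (List.nodup_range)
    intro a b h
    simpa using h
  have hndL : (L.map Prod.snd).Nodup := ((hperm.map Prod.snd).nodup_iff).2 hndP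
  have hAr := loopA_eq rated k L [] 0 le_rfl (by omega)
  have hBr := loopB_eq scores (PySem.Set.ofList rated) k (L.filter (fun p => ¬ p.2 ∈ rated)) (scores.length + 1)
      PySem.Set.empty [] 0
      (by
        have h1 := List.length_filter_le (p := fun p => decide (¬ p.2 ∈ rated)) (l := L)
        have h2 : L.length = (pairsOf scores).length := hperm.length_eq
        have h3 : (pairsOf scores).length = scores.length := by
          rw [pairsOf_eq]; simp
        omega)
      (List.Pairwise.sublist (List.filter_sublist) (sortedL_pairwise scores))
      (fun p hp => hgenP p (hperm.mem_iff.1 (List.mem_of_mem_filter hp)))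
      (List.Nodup.sublist ((List.filter_sublist (l := L)).map Prod.snd) hndL)
      (by
        intro j
        constructor
        · rintro ⟨⟨hjr, _⟩, hjb⟩
          have hjP : j ∈ (pairsOf scores).map Prod.snd := (hmemP j).2 hjb
          have hjL : j ∈ L.map Prod.snd := (hperm.map Prod.snd).mem_iff.2 hjP
          obtain ⟨p, hp, rfl⟩ := List.mem_map.1 hjL
          refine List.mem_map.2 ⟨p, List.mem_filter.2 ⟨hp, by simp [PySem.Set.mem_ofList] at hjr; simpa using hjr⟩, rfl⟩
        · intro hj
          obtain ⟨p, hp, rfl⟩ := List.mem_map.1 hj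
          have hpL := List.mem_of_mem_filter hp
          have hjr : ¬ p.2 ∈ PySem.Set.ofList rated := by
            have := (List.mem_filter.1 hp).2
            simp [PySem.Set.mem_ofList]
            simpa using this
          have hb := hgenP p (hperm.mem_iff.1 hpL)
          exact ⟨⟨hjr, List.not_mem_nil⟩, hb.1, hb.2.1⟩)
      le_rfl (by omega)
  rw [hA, hB, hAr, hBr]
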